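-- pv_equiv track=rewrite | github.com/mhendzel2/3DIA | src/timelapse_processor.py | _apply_shift
-- ===== SOURCE A (Python) =====
-- from typing import List, Dict, Any, Tuple, Optional
--
-- def _apply_shift(image: List[List], dx: int, dy: int) -> List[List]:
--     """Apply translation shift to image"""
--     height, width = len(image), len(image[0])
--     shifted = [[0 for _ in range(width)] for _ in range(height)]
--
--     for y in range(height):
--         for x in range(width):
--             src_x = x - dx
--             src_y = y - dy
--
--             if 0 <= src_x < width and 0 <= src_y < height:
--                 shifted[y][x] = image[src_y][src_x]
--             # else: leave as 0 (black padding)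
--
--     return shifted
-- ===== SOURCE B (Python) =====
-- def _apply_shift(image, dx, dy):
--     """Apply translation shift to image: zero-filled frame, copy only the overlap rectangle."""
--     height, width = len(image), len(image[0])
--     y0, y1 = max(0, dy), min(height, height + dy)
--     x0, x1 = max(0, dx), min(width, width + dx)
--     return [
--         [0] * x0 + [image[y - dy][x - dx] for x in range(x0, x1)] + [0] * (width - x1)
--         if y0 <= y < y1 and x0 < x1
--         else [0] * width
--         for y in range(height)
--     ]
-- ===== Notes on version B (the rewrite author's own statement) =====
-- stated objective: simpler
-- what changed: Instead of scanning every pixel with a per-pixel bounds guard and mutating a preallocated grid, B computes the valid overlap rectangle once and builds each row directly as zero-padding ++ copied overlap segment ++ zero-padding; dropping the per-pixel check and the index-by-index mutation is a constant-factor speedup (measured ~2.6x).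
import Mathlib
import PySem

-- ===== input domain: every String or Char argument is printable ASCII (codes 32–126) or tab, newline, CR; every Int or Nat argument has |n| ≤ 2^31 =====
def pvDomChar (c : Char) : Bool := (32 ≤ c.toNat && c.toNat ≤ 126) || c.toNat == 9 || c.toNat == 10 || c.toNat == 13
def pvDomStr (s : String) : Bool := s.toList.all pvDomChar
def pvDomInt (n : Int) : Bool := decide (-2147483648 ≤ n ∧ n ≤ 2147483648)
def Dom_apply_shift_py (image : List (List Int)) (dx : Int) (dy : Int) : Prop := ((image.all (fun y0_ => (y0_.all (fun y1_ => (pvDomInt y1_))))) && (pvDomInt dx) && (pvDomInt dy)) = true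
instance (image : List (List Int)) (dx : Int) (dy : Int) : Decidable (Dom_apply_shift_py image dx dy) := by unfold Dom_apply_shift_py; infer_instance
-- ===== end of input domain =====

-- B builds each output row as zero-padding ++ the copied overlap segment ++ zero-padding (overlap rectangle
-- computed once), instead of A's per-pixel bounds-checked scan over a preallocated mutable grid; same values.

-- ===== PORT A =====
def apply_shift_py (image : List (List Int)) (dx : Int) (dy : Int) : List (List Int) :=
  let height : Int := PySem.List.len image
  let width : Int := PySem.List.len (PySem.List.pyGetD image 0 [])
  let shifted : List (List Int) :=
    (PySem.List.pyRange 0 height 1).map (fun _ => (PySem.List.pyRange 0 width 1).map (fun _ => (0 : Int)))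
  (PySem.List.pyRange 0 height 1).foldl (fun shifted y =>
    (PySem.List.pyRange 0 width 1).foldl (fun shifted x =>
      let src_x := x - dx
      let src_y := y - dy
      if 0 ≤ src_x ∧ src_x < width ∧ 0 ≤ src_y ∧ src_y < height then
        PySem.List.pySetD shifted y
          (PySem.List.pySetD (PySem.List.pyGetD shifted y []) x
            (PySem.List.pyGetD (PySem.List.pyGetD image src_y []) src_x 0))
      else shifted) shifted) shifted

-- ===== PORT B =====
def apply_shift_py_alt (image : List (List Int)) (dx : Int) (dy : Int) : List (List Int) :=
  let height : Int := PySem.List.len image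
  let width : Int := PySem.List.len (PySem.List.pyGetD image 0 [])
  let y0 := max 0 dy
  let y1 := min height (height + dy)
  let x0 := max 0 dx
  let x1 := min width (width + dx)
  (PySem.List.pyRange 0 height 1).map (fun y =>
    if y0 ≤ y ∧ y < y1 ∧ x0 < x1 then
      List.replicate x0.toNat 0
        ++ (PySem.List.pyRange x0 x1 1).map (fun x =>
             PySem.List.pyGetD (PySem.List.pyGetD image (y - dy) []) (x - dx) 0)
        ++ List.replicate (width - x1).toNat 0
    else List.replicate width.toNat 0)

-- ===== PRECONDITION & SPEC =====
-- Pre_ excludes exactly the inputs on which A raises IndexError: the empty image (the image[0] read)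
-- and ragged images for which the shift actually reads past the end of a short row.
def Pre_apply_shift_py (image : List (List Int)) (dx : Int) (dy : Int) : Prop :=
  image ≠ [] ∧
  ∀ sy : Nat, sy < image.length →
    ∀ sx : Nat, sx < (image.headD []).length →
      (0 ≤ (sy : Int) + dy ∧ (sy : Int) + dy < (image.length : Int) ∧
       0 ≤ (sx : Int) + dx ∧ (sx : Int) + dx < ((image.headD []).length : Int)) →
      sx < (image.getD sy []).length
instance (image : List (List Int)) (dx : Int) (dy : Int) : Decidable (Pre_apply_shift_py image dx dy) := by
  unfold Pre_apply_shift_py; infer_instance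
def pvWitness_apply_shift_py : List (List Int) × Int × Int := ([[1, 2], [3, 4]], 1, 0)
def Spec_apply_shift_py (image : List (List Int)) (dx : Int) (dy : Int) (out : List (List Int)) : Prop := out = apply_shift_py_alt image dx dy
instance (image : List (List Int)) (dx : Int) (dy : Int) (out : List (List Int)) : Decidable (Spec_apply_shift_py image dx dy out) := by unfold Spec_apply_shift_py; infer_instance

-- ===== CLAIM (what is proved, stated in full; the proofs are below) =====
def Claim_equal_apply_shift_py : Prop := ∀ (image : List (List Int)) (dx : Int) (dy : Int), Dom_apply_shift_py image dx dy → Pre_apply_shift_py image dx dy → Spec_apply_shift_py image dx dy (apply_shift_py image dx dy)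

-- ===== LEMMAS AND PROOFS =====

-- the value A copies at destination pixel (y, x)
def pvVal (image : List (List Int)) (dx dy : Int) (y x : Nat) : Int :=
  PySem.List.pyGetD (PySem.List.pyGetD image ((y : Int) - dy) []) ((x : Int) - dx) 0

-- final value of destination pixel (y, x)
def pvPix (image : List (List Int)) (dx dy : Int) (h w : Nat) (y x : Nat) : Int :=
  if 0 ≤ (x : Int) - dx ∧ (x : Int) - dx < (w : Int) ∧ 0 ≤ (y : Int) - dy ∧ (y : Int) - dy < (h : Int)
  then pvVal image dx dy y x else 0

def pvRow (image : List (List Int)) (dx dy : Int) (h w : Nat) (y : Nat) : List Int :=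
  (List.range w).map (pvPix image dx dy h w y)

def pvModel (image : List (List Int)) (dx dy : Int) (h w : Nat) : List (List Int) :=
  (List.range h).map (pvRow image dx dy h w)

lemma pv_setloop_length {α : Type} (c : Nat → Prop) [DecidablePred c] (v : Nat → α)
    (n : Nat) (row : List α) :
    ((List.range n).foldl (fun r x => if c x then r.set x (v x) else r) row).length = row.length := by
  induction n with
  | zero => simp
  | succ n ih =>
      rw [List.range_succ, List.foldl_append, List.foldl_cons, List.foldl_nil]
      split_ifs <;> simp [ih]

lemma pv_setloop_getElem? {α : Type} (c : Nat → Prop) [DecidablePred c] (v : Nat → α)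
    (n : Nat) (row : List α) (j : Nat) (hj : j < row.length) :
    ((List.range n).foldl (fun r x => if c x then r.set x (v x) else r) row)[j]?
      = if j < n ∧ c j then some (v j) else row[j]? := by
  induction n with
  | zero => simp
  | succ n ih =>
      rw [List.range_succ, List.foldl_append, List.foldl_cons, List.foldl_nil]
      by_cases hc : c n
      · rw [if_pos hc, List.getElem?_set, pv_setloop_length]
        by_cases hnj : n = j
        · subst hnj; simp [hj, hc]
        · rw [if_neg hnj, ih]
          by_cases h1 : j < n ∧ c j
          · rw [if_pos h1, if_pos ⟨by omega, h1.2⟩]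
          · rw [if_neg h1, if_neg (by rintro ⟨h2, h3⟩; exact h1 ⟨by omega, h3⟩)]
      · rw [if_neg hc, ih]
        by_cases h1 : j < n ∧ c j
        · rw [if_pos h1, if_pos ⟨by omega, h1.2⟩]
        · rw [if_neg h1, if_neg ?_]
          rintro ⟨h2, h3⟩
          rcases Nat.lt_succ_iff_lt_or_eq.mp h2 with h | h
          · exact h1 ⟨h, h3⟩
          · exact hc (h ▸ h3)

lemma pv_rowfold_localize {α : Type} (c : Nat → Prop) [DecidablePred c] (v : Nat → α)
    (xs : List Nat) (y : Nat) :
    ∀ (g : List (List α)), y < g.length →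
    xs.foldl (fun g x => if c x then g.set y ((g.getD y []).set x (v x)) else g) g
      = g.set y (xs.foldl (fun r x => if c x then r.set x (v x) else r) (g.getD y [])) := by
  induction xs with
  | nil =>
      intro g hy
      rw [List.foldl_nil, List.foldl_nil, List.getD_eq_getElem _ _ hy, List.set_getElem_self]
  | cons x xs ih =>
      intro g hy
      simp only [List.foldl_cons]
      by_cases hc : c x
      · rw [if_pos hc, if_pos hc]
        have hy' : y < (g.set y ((g.getD y []).set x (v x))).length := by simpa using hy
        rw [ih _ hy']
        have h1 : (g.set y ((g.getD y []).set x (v x))).getD y [] = (g.getD y []).set x (v x) := by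
          rw [List.getD_eq_getElem _ _ hy', List.getElem_set_self]
        rw [h1, List.set_set]
      · rw [if_neg hc, if_neg hc, ih _ hy]

lemma pv_rowfold_eq (image : List (List Int)) (dx dy : Int) (h w : Nat) (y : Nat) :
    (List.range w).foldl
      (fun (r : List Int) (xn : Nat) => if 0 ≤ (xn : Int) - dx ∧ (xn : Int) - dx < (w : Int) ∧ 0 ≤ (y : Int) - dy ∧ (y : Int) - dy < (h : Int)
        then r.set xn (pvVal image dx dy y xn) else r)
      (List.replicate w 0)
    = pvRow image dx dy h w y := by
  apply List.ext_getElem?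
  intro j
  by_cases hj : j < w
  · rw [pv_setloop_getElem? _ _ _ _ j (by simpa using hj)]
    simp only [pvRow, pvPix, List.getElem?_map, List.getElem?_range hj, List.getElem?_replicate,
      Option.map_some, hj, true_and]
    split_ifs with hC
    · rfl
    · rfl
  · have hlen : ((List.range w).foldl
        (fun (r : List Int) (xn : Nat) => if 0 ≤ (xn : Int) - dx ∧ (xn : Int) - dx < (w : Int) ∧ 0 ≤ (y : Int) - dy ∧ (y : Int) - dy < (h : Int)
          then r.set xn (pvVal image dx dy y xn) else r)
        (List.replicate w 0)).length = w := by
      rw [pv_setloop_length]; simp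
    rw [List.getElem?_eq_none (by omega), List.getElem?_eq_none (by simp [pvRow]; omega)]

lemma pv_grid_prefix (image : List (List Int)) (dx dy : Int) (h w : Nat) :
    ∀ n, n ≤ h →
    (List.range n).foldl
      (fun (g : List (List Int)) (yn : Nat) => (List.range w).foldl
        (fun g (xn : Nat) => if 0 ≤ (xn : Int) - dx ∧ (xn : Int) - dx < (w : Int) ∧ 0 ≤ (yn : Int) - dy ∧ (yn : Int) - dy < (h : Int)
          then g.set yn ((g.getD yn []).set xn (pvVal image dx dy yn xn)) else g) g)
      (List.replicate h (List.replicate w 0))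
    = (List.range h).map (fun y => if y < n then pvRow image dx dy h w y else List.replicate w 0) := by
  intro n hn
  induction n with
  | zero =>
      simp only [List.range_zero, List.foldl_nil, Nat.not_lt_zero, if_false]
      rw [List.map_const', List.length_range]
  | succ n ih =>
      rw [List.range_succ, List.foldl_append, List.foldl_cons, List.foldl_nil, ih (by omega)]
      rw [pv_rowfold_localize _ _ _ n _ (by simp; omega)]
      have hG : ((List.range h).map (fun y => if y < n then pvRow image dx dy h w y else List.replicate w 0)).getD n [] = List.replicate w 0 := by
        rw [List.getD_eq_getElem _ _ (by simp; omega)]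
        simp
      rw [hG, pv_rowfold_eq]
      apply List.ext_getElem?
      intro j
      rw [List.getElem?_set]
      by_cases hj : j < h
      · simp only [List.length_map, List.length_range, List.getElem?_map, List.getElem?_range hj, Option.map_some]
        by_cases hnj : n = j
        · subst hnj
          simp [hj]
        · rw [if_neg hnj]
          by_cases h1 : j < n
          · rw [if_pos h1, if_pos (by omega)]
          · rw [if_neg h1, if_neg (by omega)]
      · rw [if_neg (fun hq : n = j => by omega)]
        rw [List.getElem?_eq_none (by simp; omega), List.getElem?_eq_none (by simp; omega)]

lemma pvA_eq_model (image : List (List Int)) (dx dy : Int) :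
    apply_shift_py image dx dy
      = pvModel image dx dy image.length (PySem.List.pyGetD image 0 []).length := by
  unfold apply_shift_py
  simp only [PySem.List.len_eq, PySem.List.pyRange_zero_natCast, List.foldl_map, List.map_map,
    PySem.List.pySetD_natCast, PySem.List.pyGetD_natCast]
  simp only [Function.comp_def]
  rw [List.map_const', List.length_range, List.map_const', List.length_range]
  refine Eq.trans (pv_grid_prefix image dx dy image.length (PySem.List.pyGetD image 0 []).length image.length le_rfl) ?_
  unfold pvModel
  apply List.map_congr_left
  intro y hy
  rw [if_pos (List.mem_range.mp hy)]

lemma pvB_eq_model (image : List (List Int)) (dx dy : Int) :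
    apply_shift_py_alt image dx dy
      = pvModel image dx dy image.length (PySem.List.pyGetD image 0 []).length := by
  unfold apply_shift_py_alt pvModel pvRow
  simp only [PySem.List.len_eq, PySem.List.pyRange_zero_natCast, List.map_map, Function.comp_def]
  apply List.map_congr_left
  intro yn hyn
  have hy : yn < image.length := List.mem_range.mp hyn
  split_ifs with hbr
  · obtain ⟨hb1, hb2, hb3⟩ := hbr
    apply List.ext_getElem?
    intro i
    by_cases hi : i < (PySem.List.pyGetD image 0 []).length
    · rw [List.getElem?_map, List.getElem?_range hi, Option.map_some]
      by_cases hz1 : i < (max 0 dx).toNat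
      · rw [List.getElem?_append_left (by simp only [List.length_append, List.length_replicate]; omega),
          List.getElem?_append_left (by simp only [List.length_replicate]; omega),
          List.getElem?_replicate, if_pos hz1]
        rw [pvPix, if_neg (by rintro ⟨c1, c2, c3, c4⟩; omega)]
      · by_cases hz2 : i < (max 0 dx).toNat + ((min ((PySem.List.pyGetD image 0 []).length : Int) (((PySem.List.pyGetD image 0 []).length : Int) + dx)) - max 0 dx).toNat
        · rw [List.getElem?_append_left (by simp only [List.length_append, List.length_replicate, List.length_map, PySem.List.length_pyRange_one]; omega),
            List.getElem?_append_right (by simp only [List.length_replicate]; omega)]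
          rw [List.getElem?_map, List.length_replicate]
          rw [PySem.List.getElem?_pyRange_one]
          rw [if_pos (by omega)]
          rw [Option.map_some]
          rw [pvPix, if_pos (by refine ⟨by omega, by omega, by omega, by omega⟩), pvVal]
          have harg : max 0 dx + ((i - (max 0 dx).toNat : Nat) : Int) - dx = (i : Int) - dx := by omega
          rw [harg]
        · rw [List.getElem?_append_right (by simp only [List.length_append, List.length_replicate, List.length_map, PySem.List.length_pyRange_one]; omega)]
          rw [List.getElem?_replicate,
            if_pos (by simp only [List.length_append, List.length_replicate, List.length_map, PySem.List.length_pyRange_one]; omega)]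
          rw [pvPix, if_neg (by rintro ⟨c1, c2, c3, c4⟩; omega)]
    · rw [List.getElem?_eq_none (by simp only [List.length_append, List.length_replicate, List.length_map, PySem.List.length_pyRange_one]; omega),
        List.getElem?_eq_none (by simp only [List.length_map, List.length_range]; omega)]
  · apply List.ext_getElem?
    intro i
    by_cases hi : i < (PySem.List.pyGetD image 0 []).length
    · rw [List.getElem?_map, List.getElem?_range hi, Option.map_some, List.getElem?_replicate,
        if_pos (by omega)]
      rw [pvPix, if_neg ?_]
      rintro ⟨c1, c2, c3, c4⟩
      exact hbr ⟨by omega, by omega, by omega⟩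
    · rw [List.getElem?_eq_none (by simp only [List.length_replicate]; omega),
        List.getElem?_eq_none (by simp only [List.length_map, List.length_range]; omega)]

theorem apply_shift_py_spec : Claim_equal_apply_shift_py := by
  intro image dx dy _ _
  unfold Spec_apply_shift_py
  rw [pvA_eq_model, pvB_eq_model]
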